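/- GENERATED by tools/from_farm_form.py from prooffarm-gif/accepted/DGifDecompressLine.13/Proof.lean (a worked proof of the farm's unit `DGifDecompressLine.13`,
   accepted by the verdict) — do not edit. -/
import Gif.Spec.Units.DGifDecompressLine_13
import Gif.Spec.Proved.DGifDecompressLine_13_Lemmas

open X86 X86.User Asan ProgX.Base ProgX.Base.Spec Gif.Spec

set_option maxRecDepth 4000
set_option maxHeartbeats 4000000

/-- Segment 13 of `DGifDecompressLine` (106FEAH … 107045H and 106F75H … 106F7DH; l.974-979 and l.995): from `Upd` behind the arms
of the main loop, through the three tests `LastCode != NO_SUCH_CODE`, `RunningCode <= 4097` (the checked load of RunningCode),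
`Prefix[RunningCode − 2] == NO_SUCH_CODE` (the checked load inside `Prefix[4096]`, by [LZ3]). One test false: `LastCode = CrntCode`
(l.995), the head of the main loop with the same (smaller than `m`) measure. All true: the store `Prefix[RunningCode − 2] = LastCode`,
`r15d = RunningCode`, and `UpdRC` at 106F43H or 107045H. -/
theorem Gif.Spec.Proved.DGifDecompressLine_13_ok : Gif.Spec.DGifDecompressLine_13.Statement := by
  intro Lay hLay μ hμ u₀ hcode h_load4 H rest frames F R n m e ret v hat
  obtain ⟨hmain, h_mu⟩ := hat
  have hbody := hmain.body
  have h_r14 : (v.reg .r14).toNat = F.pv := hmain.r14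
  have h_r13 : (v.reg .r13).toNat = F.pv + 8536 := hmain.r13
  -- 1. THE PRELUDE (the same in every segment of this function; Gif/Spec/LzwCarry.lean §2)
  -- the entry state's facts: `he_room`, `he_top`, `he_retAddr`, …
  have he := hbody.entry
  v_entry he
  -- where gif and pv are, and that LineLen is an `int` (what `v_side` / `u_same` / `u_omega` need to place the stores)
  have hgin := hbody.gif_inside
  have hpin := hbody.pv_inside
  have hn31 : n < 2 ^ 31 := hbody.len_lt
  -- the present state, in the walker's names
  have w_rip := hbody.rip
  have c_rsp : v.reg .rsp = e.reg .rsp - 200 := hbody.rsp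
  have w_eq : Mem.EqOn ProgX.Base.L.textLo ProgX.Base.L.textHi u₀.mem v.mem := ProgX.Base.conv_code_eqOn hbody.code
  have hdf : v.flags .df = false := (show abiInv _ from hbody.abi).1
  have hmx : v.mxcsr &&& 0x1F80 = 0x1F80 := (show abiInv _ from hbody.abi).2
  have hsse := ProgX.Base.sseOK_of_abiInv hbody.abi
  have w_kept : RegsKept [.rsp] v v := RegsKept.refl _ _
  -- 2. THE SLOTS AND FIELDS THE SEGMENT LOADS
  -- `[rsp+14H]` = LastCode and `[rsp+70H]` = CrntCode: ANY 32-bit values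
  obtain ⟨lc, k_lc⟩ : ∃ lc, v.mem.readLE (e.reg .rsp - 180) 4 = lc := ⟨_, rfl⟩
  obtain ⟨cc, k_cc⟩ : ∃ cc, v.mem.readLE (e.reg .rsp - 88) 4 = cc := ⟨_, rfl⟩
  -- `Private->RunningCode`: `2 ≤ RunningCode ≤ 4097` by [LZ3]
  obtain ⟨rc, k_rc⟩ : ∃ rc, GifFilePrivateType.RunningCode v.mem F.pv = rc := ⟨_, rfl⟩
  have hrc_lo : 2 ≤ rc := by
    have hlo := hbody.lz.code_lo
    omega
  have hrc_hi : rc ≤ 4097 := by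
    have hhi := hbody.lz.code_hi
    omega
  have l_rc : v.mem.readLE (v.reg .r14 + 20) 4 = rc := by
    rw [rd_eq_readLE v.mem _ (F.pv + 20) 4 (by u_omega)]
    simp only [gfield] at k_rc
    exact k_rc
  -- `Prefix[RunningCode − 2]`: ANY 32-bit value
  obtain ⟨pf, l_pf⟩ : ∃ pf, v.mem.readLE (UInt64.ofNat (F.pv + 8528 + 4 * rc)) 4 = pf := ⟨_, rfl⟩
  -- the private object is live under the body's frames
  have hlpv : LiveIn (H.liveObjs ++ rest) (DGifDecompressLine.framesIn frames e) F.pv 24936 :=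
    hbody.ok.pv_live.liveIn rest _ (Nat.le_refl _) (Nat.le_refl _)
  -- 3. THE WALK, FIRST PART (106FEAH … 107013H; l.974-976): the tests of LastCode and RunningCode, up to the check of `Prefix[…]`
  u_walk hcode [hμ.vendor, Gif.Spec.cnt32_ofBV rc (by omega), Gif.Spec.cnt32_sext rc (by omega)]
    until [Gif.L.DGifDecompressLine.at_106f7d, Gif.L.DGifDecompressLine.chk32]
    span [ProgX.Base.L.textLo, ProgX.Base.L.textHi] side (v_side)
  case check_106ff8 =>
    -- 0x106ff8, l.975 `Private->RunningCode`: a scalar field of pv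
    have hun : ShadowUntouched v.mem s_106ff8.mem := by v_untouched
    exact hlpv.accSmall hbody.inv.shadow hun _ 4 (by decide) (by u_omega) (by u_omega)
  · -- EXIT 0x106f7d from the `je` of 0x106ff2 (l.974, `LastCode == NO_SUCH_CODE`): `LastCode = CrntCode` (l.995), to the head
    have hun : ShadowUntouched v.mem s_106f79.mem := by v_untouched
    have hsame : Mem.SameExcept [⟨(e.reg .rsp).toNat - 180, (e.reg .rsp).toNat - 176⟩] v.mem s_106f79.mem := by
      rw [w_mem]
      u_same
    have habi : (conv u₀).inv s_106f79 := by v_inv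
    obtain ⟨k_main, k_mu⟩ := Gif.Spec.DGifDecompressLine_13.dl13_main (cut' := Gif.L.DGifDecompressLine.at_106f7d)
      hmain w_rip w_rsp w_eq habi hun hsame (by dl_scratch) (w_kept .r14 rfl) (w_kept .r13 rfl) (w_kept .rbx rfl) (w_kept .rbp rfl)
    refine ReachVia.done (Or.inl ⟨_, ?_, k_main, rfl⟩)
    rw [k_mu]
    exact h_mu
  · -- EXIT 0x106f7d from the `jg` of 0x107006 (l.974, `RunningCode > 4097`; dead by [LZ3], walked all the same): to the head
    have hun : ShadowUntouched v.mem s_106f79.mem := by v_untouched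
    have hsame : Mem.SameExcept [⟨(e.reg .rsp).toNat - 208, (e.reg .rsp).toNat - 200⟩,
        ⟨(e.reg .rsp).toNat - 180, (e.reg .rsp).toNat - 176⟩] v.mem s_106f79.mem := by
      rw [w_mem]
      u_same
    have habi : (conv u₀).inv s_106f79 := by v_inv
    obtain ⟨k_main, k_mu⟩ := Gif.Spec.DGifDecompressLine_13.dl13_main (cut' := Gif.L.DGifDecompressLine.at_106f7d)
      hmain w_rip w_rsp w_eq habi hun hsame (by dl_scratch) (w_kept .r14 rfl) (w_kept .r13 rfl) (w_kept .rbx rfl) (w_kept .rbp rfl)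
    refine ReachVia.done (Or.inl ⟨_, ?_, k_main, rfl⟩)
    rw [k_mu]
    exact h_mu
  · -- 0x107016 (l.976): `r12 = rdi = &Prefix[RunningCode − 2]`, as the word of a number
    have e_r12 := Gif.Spec.DGifDecompressLine_13.dl13_prefix_addr (v.reg .r13) F.pv rc h_r13 hpin.2.1 hrc_lo hrc_hi
    rw [e_r12] at w_r12 w_rdi
    -- 4. THE WALK, SECOND PART (107016H … 107045H; l.976-979): the test of `Prefix[…]`, the store, the test of l.979
    u_walk hcode [hμ.vendor]
      until [Gif.L.DGifDecompressLine.at_106f7d, Gif.L.DGifDecompressLine.at_106f43, Gif.L.DGifDecompressLine.at_107045]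
      span [ProgX.Base.L.textLo, ProgX.Base.L.textHi] side (v_side)
    case check_107016 =>
      -- 0x107016, l.976 `Prefix[RunningCode − 2]`: inside `Prefix[4096]` (`2 ≤ RunningCode ≤ 4097`)
      have hun : ShadowUntouched v.mem s_107016.mem := by v_untouched
      have hl := prefixLive hbody.ok.pv_live rest (DGifDecompressLine.framesIn frames e) (rc - 2) (by omega)
      simp only [gfield] at hl
      exact hl.accSmall hbody.inv.shadow hun _ 4 (by decide) (by u_omega) (by u_omega)
    · -- EXIT 0x106f7d from the `jne` of 0x107023 (l.975, `Prefix[…] != NO_SUCH_CODE`): `LastCode = CrntCode`, to the head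
      have hun : ShadowUntouched v.mem s_106f79.mem := by v_untouched
      have hsame : Mem.SameExcept [⟨(e.reg .rsp).toNat - 208, (e.reg .rsp).toNat - 200⟩,
          ⟨(e.reg .rsp).toNat - 180, (e.reg .rsp).toNat - 176⟩] v.mem s_106f79.mem := by
        rw [w_mem]
        u_same
      have habi : (conv u₀).inv s_106f79 := by v_inv
      obtain ⟨k_main, k_mu⟩ := Gif.Spec.DGifDecompressLine_13.dl13_main (cut' := Gif.L.DGifDecompressLine.at_106f7d)
        hmain w_rip w_rsp w_eq habi hun hsame (by dl_scratch) (w_kept .r14 rfl) (w_kept .r13 rfl) (w_kept .rbx rfl)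
        (w_kept .rbp rfl)
      refine ReachVia.done (Or.inl ⟨_, ?_, k_main, rfl⟩)
      rw [k_mu]
      exact h_mu
    · -- EXIT 0x106f43 (l.979, `CrntCode == RunningCode − 2`): `UpdRC`, `r15d = RunningCode`
      have hun : ShadowUntouched v.mem s_10703f.mem := by v_untouched
      have hsame : Mem.SameExcept [⟨(e.reg .rsp).toNat - 208, (e.reg .rsp).toNat - 200⟩,
          ⟨F.pv + 8536, F.pv + 24920⟩] v.mem s_10703f.mem := by
        rw [w_mem]
        u_same
      have habi : (conv u₀).inv s_10703f := by v_inv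
      obtain ⟨k_main, k_mu⟩ := Gif.Spec.DGifDecompressLine_13.dl13_main (cut' := Gif.L.DGifDecompressLine.at_106f43)
        hmain w_rip w_rsp w_eq habi hun hsame (by dl_scratch) (w_kept .r14 rfl) (w_kept .r13 rfl) (w_kept .rbx rfl)
        (w_kept .rbp rfl)
      have e_r15 : (s_10703f.reg .r15).toNat = rc := by
        rw [w_r15]
        exact Gif.Spec.toNat_ofBV_ofNat32 rc (by omega)
      refine ReachVia.done (Or.inr (Or.inl ⟨⟨k_main, ?_⟩, ?_, ?_⟩))
      · rw [k_mu]
        exact h_mu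
      · rw [e_r15]
        exact hrc_lo
      · rw [e_r15]
        exact hrc_hi
    · -- EXIT 0x107045 (l.979, `CrntCode != RunningCode − 2`): `UpdRC`, `r15d = RunningCode`
      have hun : ShadowUntouched v.mem s_10703f.mem := by v_untouched
      have hsame : Mem.SameExcept [⟨(e.reg .rsp).toNat - 208, (e.reg .rsp).toNat - 200⟩,
          ⟨F.pv + 8536, F.pv + 24920⟩] v.mem s_10703f.mem := by
        rw [w_mem]
        u_same
      have habi : (conv u₀).inv s_10703f := by v_inv
      obtain ⟨k_main, k_mu⟩ := Gif.Spec.DGifDecompressLine_13.dl13_main (cut' := Gif.L.DGifDecompressLine.at_107045)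
        hmain w_rip w_rsp w_eq habi hun hsame (by dl_scratch) (w_kept .r14 rfl) (w_kept .r13 rfl) (w_kept .rbx rfl)
        (w_kept .rbp rfl)
      have e_r15 : (s_10703f.reg .r15).toNat = rc := by
        rw [w_r15]
        exact Gif.Spec.toNat_ofBV_ofNat32 rc (by omega)
      refine ReachVia.done (Or.inr (Or.inr ⟨⟨k_main, ?_⟩, ?_, ?_⟩))
      · rw [k_mu]
        exact h_mu
      · rw [e_r15]
        exact hrc_lo
      · rw [e_r15]
        exact hrc_hi
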